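-- pv_equiv track=rewrite | github.com/Jackylyn1/cs50 | helpers.py | substr_list
-- ===== SOURCE A (Python) =====
-- def substr_list(a, n):
--     a_list = list()
--     i = 0
--     while i < n:
--         a_new = a[i:]
--         while len(a_new) >= n:
--             a_list.append(a_new[0:n])
--             a_new = a_new[n:]
--         i += 1
--     return a_list
-- ===== SOURCE B (Python) =====
-- def substr_list(a, n):
--     if n <= 0:
--         return []
--     return [a[i + j * n : i + j * n + n]
--             for i in range(n)
--             for j in range((len(a) - i) // n)]
-- ===== Notes on version B (the rewrite author's own statement) =====
-- stated objective: alternative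
-- what changed: A's nested while loops that repeatedly re-slice a shrinking copy of the string are replaced by a single comprehension over closed-form chunk positions i + j*n, with the chunk count per offset computed directly as (len(a)-i)//n.
import Mathlib
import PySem

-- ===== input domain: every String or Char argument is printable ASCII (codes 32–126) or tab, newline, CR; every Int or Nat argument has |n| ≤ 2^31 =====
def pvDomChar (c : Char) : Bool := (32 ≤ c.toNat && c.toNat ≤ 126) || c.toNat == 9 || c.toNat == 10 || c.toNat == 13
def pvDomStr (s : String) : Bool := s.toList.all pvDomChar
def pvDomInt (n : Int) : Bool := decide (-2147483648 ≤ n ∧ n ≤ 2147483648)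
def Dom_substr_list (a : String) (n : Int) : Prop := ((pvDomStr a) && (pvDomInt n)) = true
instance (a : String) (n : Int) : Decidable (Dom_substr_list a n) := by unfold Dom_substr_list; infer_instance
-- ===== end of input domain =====

-- B replaces A's nested while loops by one comprehension over closed-form chunk
-- positions i + j*n with chunk count (len(a)-i)//n (alternative decomposition).

-- ===== PORT A =====
-- inner 'while len(a_new) >= n' loop of A.  The '0 < n' conjunct of the guard is a pure
-- termination guard: A only reaches this loop with 0 < n (the outer 'while i < n' starts at i = 0).
def substrInnerA (n : Int) (aNew : String) (acc : List String) : List String :=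
  if h : 0 < n ∧ n ≤ PySem.Str.len aNew then
    substrInnerA n (PySem.Str.slice aNew (some n) none)
      (acc ++ [PySem.Str.slice aNew (some 0) (some n)])
  else acc
termination_by aNew.toList.length
decreasing_by
  simp only [PySem.Str.toList_slice, PySem.Chars.slice_eq_listSlice,
    PySem.List.slice_from _ (le_of_lt h.1), List.length_drop]
  have h2 := h.2
  simp only [PySem.Str.len_eq] at h2
  omega

-- 'while i < n: … ; i += 1' starting from i = 0 is the walk over range(0, n)
def substr_list (a : String) (n : Int) : List String :=
  (PySem.List.pyRange 0 n 1).foldl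
    (fun acc i => substrInnerA n (PySem.Str.slice a (some i) none) acc) []

-- ===== PORT B =====
def substr_list_alt (a : String) (n : Int) : List String :=
  if n ≤ 0 then []
  else
    (PySem.List.pyRange 0 n 1).flatMap (fun i =>
      (PySem.List.pyRange 0 (PySem.Int.floordiv (PySem.Str.len a - i) n) 1).map (fun j =>
        PySem.Str.slice a (some (i + j * n)) (some (i + j * n + n))))

-- ===== PRECONDITION & SPEC =====
def Spec_substr_list (a : String) (n : Int) (out : List String) : Prop := out = substr_list_alt a n
instance (a : String) (n : Int) (out : List String) : Decidable (Spec_substr_list a n out) := by unfold Spec_substr_list; infer_instance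

-- ===== CLAIM (what is proved, stated in full; the proofs are below) =====
def Claim_equal_substr_list : Prop := ∀ (a : String) (n : Int), Dom_substr_list a n → Spec_substr_list a n (substr_list a n)

-- ===== LEMMAS AND PROOFS =====

-- Str.slice is String.ofList of the list-level slice
theorem strSlice_ofList (s : String) (a? b? : Option Int) :
    PySem.Str.slice s a? b? = String.ofList (PySem.List.slice s.toList a? b?) := by
  simp [PySem.Str.slice]

-- the inner loop produces the chunks at positions 0, N, 2N, … of its argument
theorem substrInnerA_eq (n : Int) (aNew : String) (acc : List String) (hn : 0 < n) :
    substrInnerA n aNew acc =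
      acc ++ (List.range (aNew.toList.length / n.toNat)).map
        (fun j => String.ofList ((aNew.toList.drop (j * n.toNat)).take n.toNat)) := by
  induction aNew, acc using substrInnerA.induct n with
  | case1 aNew acc h ih =>
    rw [substrInnerA, dif_pos h, ih]
    have hlen : (n : Int) ≤ (aNew.toList.length : Int) := by
      have h2 := h.2; simpa [PySem.Str.len_eq] using h2
    have hNle : n.toNat ≤ aNew.toList.length := by omega
    have hNpos : 0 < n.toNat := by omega
    have hdrop : (PySem.Str.slice aNew (some n) none).toList = aNew.toList.drop n.toNat := by
      simp only [PySem.Str.toList_slice, PySem.Chars.slice_eq_listSlice,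
        PySem.List.slice_from _ (le_of_lt h.1)]
    rw [hdrop, List.length_drop]
    rw [Nat.div_eq_sub_div hNpos hNle]
    rw [List.range_succ_eq_map, List.map_cons, List.map_map]
    have hchunk0 : PySem.Str.slice aNew (some 0) (some n) =
        String.ofList ((aNew.toList.drop (0 * n.toNat)).take n.toNat) := by
      rw [strSlice_ofList]
      simp only [PySem.List.slice_zero_start, PySem.List.slice_to _ (le_of_lt h.1),
        Nat.zero_mul, List.drop_zero]
    have hof : ∀ x y : Nat, x = y →
        String.ofList ((aNew.toList.drop x).take n.toNat)
          = String.ofList ((aNew.toList.drop y).take n.toNat) := by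
      intro x y hxy; rw [hxy]
    rw [List.append_assoc, List.singleton_append, hchunk0]
    congr 1
    congr 1
    apply List.map_congr_left
    intro j _
    simp only [Function.comp_apply, List.drop_drop]
    exact hof _ _ (by simp [Nat.succ_eq_add_one]; ring)
  | case2 aNew acc h =>
    rw [substrInnerA, dif_neg h]
    have hlt : aNew.toList.length < n.toNat := by
      by_contra hc
      apply h
      refine ⟨hn, ?_⟩
      simp only [PySem.Str.len_eq]
      omega
    rw [Nat.div_eq_of_lt hlt]
    simp

-- per-offset agreement: B's closed-form inner list equals A's chunk list for offset I < N
theorem inner_agree (a : String) (N I : Nat) (hN : 0 < N) :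
    (PySem.List.pyRange 0 (PySem.Int.floordiv (PySem.Str.len a - (I : Int)) (N : Int)) 1).map
        (fun j => PySem.Str.slice a (some ((I : Int) + j * (N : Int)))
          (some ((I : Int) + j * (N : Int) + (N : Int))))
      = (List.range ((a.toList.length - I) / N)).map
          (fun j => String.ofList (((a.toList.drop I).drop (j * N)).take N)) := by
  have hlen : PySem.Str.len a = (a.toList.length : Int) := by simp [PySem.Str.len_eq]
  by_cases hiL : I ≤ a.toList.length
  · have hcast : PySem.Str.len a - (I : Int) = ((a.toList.length - I : Nat) : Int) := by
      rw [hlen]; omega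
    rw [hcast, PySem.Int.floordiv_natCast, PySem.List.pyRange_zero_nat, List.map_map]
    apply List.map_congr_left
    intro j _
    simp only [Function.comp_apply]
    have e1 : (I : Int) + (j : Int) * (N : Int) = ((I + j * N : Nat) : Int) := by
      push_cast; ring
    have e2 : (a.toList.drop I).drop (j * N) = a.toList.drop (I + j * N) := by
      rw [List.drop_drop]
    rw [strSlice_ofList, e1, PySem.List.slice_natCast_add, e2]
  · have h1 : PySem.Int.floordiv (PySem.Str.len a - (I : Int)) (N : Int) ≤ 0 := by
      have h2 := (PySem.Int.floordiv_lt_iff_lt_mul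
        (a := PySem.Str.len a - (I : Int)) (b := (N : Int)) (q := 1)
        (by exact_mod_cast hN)).mpr (by rw [hlen]; push_cast; omega)
      omega
    rw [PySem.List.pyRange_one_eq_nil h1]
    have h2 : a.toList.length - I = 0 := by omega
    rw [h2, Nat.zero_div, List.range_zero]
    simp

-- ===== VERDICT (by name: the statement is the Claim_ definition above) =====
theorem substr_list_spec : Claim_equal_substr_list := by
  intro a n _
  unfold Spec_substr_list substr_list substr_list_alt
  by_cases hn : n ≤ 0
  · rw [PySem.List.pyRange_one_eq_nil hn, if_pos hn]
    rfl
  · rw [if_neg hn]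
    obtain ⟨N, rfl⟩ : ∃ N : Nat, n = (N : Int) := ⟨n.toNat, by omega⟩
    have hN : 0 < N := by omega
    have hbody : ∀ (acc : List String), ∀ i ∈ PySem.List.pyRange 0 (N : Int) 1,
        (fun acc (i : Int) => substrInnerA (N : Int) (PySem.Str.slice a (some i) none) acc) acc i
          = (fun acc (i : Int) => acc ++
              (List.range ((a.toList.length - i.toNat) / ((N : Int)).toNat)).map
                (fun j => String.ofList
                  (((a.toList.drop i.toNat).drop (j * ((N : Int)).toNat)).take ((N : Int)).toNat)))
              acc i := by
      intro acc i hi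
      have hi0 : 0 ≤ i := (PySem.List.mem_pyRange_one.1 hi).1
      have hsl : (PySem.Str.slice a (some i) none).toList = a.toList.drop i.toNat := by
        simp only [PySem.Str.toList_slice, PySem.Chars.slice_eq_listSlice,
          PySem.List.slice_from _ hi0]
      simp only
      rw [substrInnerA_eq (N : Int) _ acc (by exact_mod_cast hN), hsl, List.length_drop]
    rw [PySem.List.foldl_congr_mem _ _ _ [] hbody]
    rw [PySem.List.foldl_append_eq_flatMap, List.nil_append]
    apply List.flatMap_congr
    intro i hi
    obtain ⟨I, rfl⟩ : ∃ I : Nat, i = (I : Int) :=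
      ⟨i.toNat, by have := (PySem.List.mem_pyRange_one.1 hi).1; omega⟩
    simp only [Int.toNat_natCast]
    exact (inner_agree a N I hN).symm
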